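-- pv_equiv track=rewrite | github.com/chuan298/ocr_pdf | main.py | check_diff_char_in_2_strings
-- ===== SOURCE A (Python) =====
-- def check_diff_char_in_2_strings(str1, str2):
--     str1 = list(str1)
--     str2 = list(str2)
--     res = []
--     for s1 in str1:
--         if s1 in str2:
--             str2.remove(s1)
--         else:
--             res.append(s1)
--     return res + str2
-- ===== SOURCE B (Python) =====
-- def check_diff_char_in_2_strings(str1, str2):
--     # count available chars of str2 once, single pass over str1,
--     # then one pass over str2 skipping the consumed first occurrences
--     avail = {}
--     for c in str2:
--         avail[c] = avail.get(c, 0) + 1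
--     res = []
--     skip = {}
--     for c in str1:
--         if avail.get(c, 0) > 0:
--             avail[c] = avail[c] - 1
--             skip[c] = skip.get(c, 0) + 1
--         else:
--             res.append(c)
--     for c in str2:
--         if skip.get(c, 0) > 0:
--             skip[c] = skip[c] - 1
--         else:
--             res.append(c)
--     return res
-- ===== Notes on version B (the rewrite author's own statement) =====
-- stated objective: faster
-- what changed: Replaces the O(n*m) loop with 'in'/remove scans over a shrinking list by two counting dictionaries: one pass counts str2, one pass over str1 consumes counts, one pass over str2 skips the consumed first occurrences.
import Mathlib
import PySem

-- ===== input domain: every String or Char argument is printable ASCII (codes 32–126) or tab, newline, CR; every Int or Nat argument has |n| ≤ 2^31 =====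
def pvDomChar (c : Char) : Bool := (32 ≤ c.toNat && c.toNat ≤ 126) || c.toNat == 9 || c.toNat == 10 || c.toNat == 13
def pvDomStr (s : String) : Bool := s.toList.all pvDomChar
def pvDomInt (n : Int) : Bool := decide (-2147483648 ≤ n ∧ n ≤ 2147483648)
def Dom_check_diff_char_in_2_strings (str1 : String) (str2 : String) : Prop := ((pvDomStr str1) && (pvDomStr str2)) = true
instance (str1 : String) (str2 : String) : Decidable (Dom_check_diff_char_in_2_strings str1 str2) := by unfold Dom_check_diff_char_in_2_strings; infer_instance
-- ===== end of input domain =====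

-- B replaces A's O(n*m) membership/remove scans over a shrinking list by two counting
-- dictionaries and three linear passes (objective: faster, asymptotic).

-- ===== PORT A =====
-- loop 'for s1 in str1' with mutable str2 (list) and res; returns (res, final str2)
def pvGoA : List Char → List Char → List Char → List Char × List Char
  | [], s2, res => (res, s2)
  | c :: cs, s2, res =>
    if c ∈ s2 then pvGoA cs (s2.erase c) res   -- str2.remove(s1): erase first occurrence
    else pvGoA cs s2 (res ++ [c])

def check_diff_char_in_2_strings (str1 : String) (str2 : String) : List String :=
  ((pvGoA str1.toList str2.toList []).1 ++ (pvGoA str1.toList str2.toList []).2).map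
    (fun c => String.ofList [c])   -- list(str) elements are 1-char strings

-- ===== PORT B =====
-- first loop over str1: consume from avail, record consumption in skip, else append to res
def pvLoop1 : List Char → PySem.Dict Char Int → PySem.Dict Char Int → List Char →
    PySem.Dict Char Int × PySem.Dict Char Int × List Char
  | [], avail, skip, res => (avail, skip, res)
  | c :: cs, avail, skip, res =>
    if avail.getD c 0 > 0 then
      pvLoop1 cs (avail.insert c (avail.getD c 0 - 1)) (skip.insert c (skip.getD c 0 + 1)) res
    else
      pvLoop1 cs avail skip (res ++ [c])

-- second loop over str2: skip the consumed first occurrences, append the rest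
def pvLoop2 : List Char → PySem.Dict Char Int → List Char → PySem.Dict Char Int × List Char
  | [], skip, res => (skip, res)
  | c :: cs, skip, res =>
    if skip.getD c 0 > 0 then pvLoop2 cs (skip.insert c (skip.getD c 0 - 1)) res
    else pvLoop2 cs skip (res ++ [c])

def check_diff_char_in_2_strings_alt (str1 : String) (str2 : String) : List String :=
  ((pvLoop2 str2.toList
      (pvLoop1 str1.toList
        (str2.toList.foldl (fun d c => d.insert c (d.getD c 0 + 1)) PySem.Dict.empty)
        PySem.Dict.empty []).2.1
      (pvLoop1 str1.toList
        (str2.toList.foldl (fun d c => d.insert c (d.getD c 0 + 1)) PySem.Dict.empty)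
        PySem.Dict.empty []).2.2).2).map (fun c => String.ofList [c])

-- ===== PRECONDITION & SPEC =====
def Spec_check_diff_char_in_2_strings (str1 : String) (str2 : String) (out : List String) : Prop := out = check_diff_char_in_2_strings_alt str1 str2
instance (str1 : String) (str2 : String) (out : List String) : Decidable (Spec_check_diff_char_in_2_strings str1 str2 out) := by unfold Spec_check_diff_char_in_2_strings; infer_instance

-- ===== CLAIM (what is proved, stated in full; the proofs are below) =====
def Claim_equal_check_diff_char_in_2_strings : Prop := ∀ (str1 : String) (str2 : String), Dom_check_diff_char_in_2_strings str1 str2 → Spec_check_diff_char_in_2_strings str1 str2 (check_diff_char_in_2_strings str1 str2)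

-- ===== LEMMAS AND PROOFS =====

-- pure model of a skip-table over Char
def pvDec (f : Char → Int) (c : Char) : Char → Int := fun x => if x = c then f x - 1 else f x
def pvInc (f : Char → Int) (c : Char) : Char → Int := fun x => if x = c then f x + 1 else f x

-- what loop 2 keeps: skip the first (f c) occurrences of each c
def pvSkipF (f : Char → Int) : List Char → List Char
  | [] => []
  | c :: cs => if f c > 0 then pvSkipF (pvDec f c) cs else c :: pvSkipF f cs

theorem pvSkipF_zero (l : List Char) : pvSkipF (fun _ => 0) l = l := by
  induction l with
  | nil => rfl
  | cons c cs ih => simp [pvSkipF, ih]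

theorem pvLoop2_eq (l : List Char) : ∀ (skip : PySem.Dict Char Int) (res : List Char),
    (pvLoop2 l skip res).2 = res ++ pvSkipF (fun c => skip.getD c 0) l := by
  induction l with
  | nil => intro skip res; simp [pvLoop2, pvSkipF]
  | cons c cs ih =>
    intro skip res
    by_cases h : skip.getD c 0 > 0
    · have hf : (fun x => (skip.insert c (skip.getD c 0 - 1)).getD x 0)
          = pvDec (fun x => skip.getD x 0) c := by
        funext x; rw [PySem.Dict.getD_insert]
        by_cases hx : x = c
        · subst hx; simp [pvDec]
        · simp [pvDec, hx]
      simp only [pvLoop2, if_pos h, ih, hf, pvSkipF]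
    · simp only [pvLoop2, ih, pvSkipF, if_neg h, List.append_assoc,
        List.singleton_append]

theorem pvSkipF_inc (l : List Char) : ∀ (f : Char → Int), (∀ x, 0 ≤ f x) → ∀ (c : Char),
    pvSkipF (pvInc f c) l = (pvSkipF f l).erase c := by
  induction l with
  | nil => intro f _ c; rfl
  | cons x xs ih =>
    intro f hf c
    by_cases hxc : x = c
    · subst hxc
      have h1 : pvInc f x x > 0 := by
        show (if x = x then f x + 1 else f x) > 0
        rw [if_pos rfl]; have := hf x; omega
      have h2 : pvDec (pvInc f x) x = f := by
        funext y
        by_cases hy : y = x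
        · subst hy; simp [pvDec, pvInc]
        · simp [pvDec, pvInc, hy]
      by_cases h : f x > 0
      · have h3 : pvInc (pvDec f x) x = f := by
          funext y
          by_cases hy : y = x
          · subst hy; simp [pvDec, pvInc]
          · simp [pvDec, pvInc, hy]
        have hdec : ∀ y, 0 ≤ pvDec f x y := by
          intro y
          by_cases hy : y = x
          · subst hy; simp [pvDec]; omega
          · simp [pvDec, hy]; exact hf y
        have := ih (pvDec f x) hdec x
        rw [h3] at this
        simp only [pvSkipF, if_pos h, if_pos h1, h2, ← this]
      · simp only [pvSkipF, if_neg h, if_pos h1, h2, List.erase_cons_head]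
    · have hIncx : pvInc f c x = f x := by simp [pvInc, hxc]
      by_cases h : f x > 0
      · have hcomm : pvDec (pvInc f c) x = pvInc (pvDec f x) c := by
          funext y
          by_cases hy1 : y = x
          · subst hy1; simp [pvDec, pvInc, hxc]
          · by_cases hy2 : y = c
            · subst hy2; simp [pvDec, pvInc, hy1]
            · simp [pvDec, pvInc, hy1, hy2]
        have hdec : ∀ y, 0 ≤ pvDec f x y := by
          intro y
          by_cases hy : y = x
          · subst hy; simp [pvDec]; omega
          · simp [pvDec, hy]; exact hf y
        simp only [pvSkipF, hIncx, if_pos h, hcomm, ih (pvDec f x) hdec c]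
      · have hbe : (x == c) = false := by simp [hxc]
        simp [pvSkipF, hIncx, if_neg h, hbe, ih f hf c]

theorem pvMain (orig : List Char) (l : List Char) :
    ∀ (s2 : List Char) (avail skip : PySem.Dict Char Int) (res : List Char),
    (∀ c, avail.getD c 0 = (s2.count c : Int)) →
    (∀ c, 0 ≤ skip.getD c 0) →
    pvSkipF (fun c => skip.getD c 0) orig = s2 →
    (pvGoA l s2 res).1 = (pvLoop1 l avail skip res).2.2 ∧
    pvSkipF (fun c => (pvLoop1 l avail skip res).2.1.getD c 0) orig = (pvGoA l s2 res).2 := by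
  induction l with
  | nil =>
    intro s2 avail skip res _ _ h3
    exact ⟨rfl, h3⟩
  | cons c cs ih =>
    intro s2 avail skip res h1 h2 h3
    by_cases hc : avail.getD c 0 > 0
    · have hcnt : 0 < s2.count c := by have := h1 c; omega
      have hmem : c ∈ s2 := List.count_pos_iff.mp hcnt
      have h1' : ∀ x, (avail.insert c (avail.getD c 0 - 1)).getD x 0
          = ((s2.erase c).count x : Int) := by
        intro x
        rw [PySem.Dict.getD_insert]
        by_cases hx : x = c
        · subst hx
          rw [if_pos rfl, h1 x, List.count_erase_self]
          omega
        · rw [if_neg hx, h1 x, List.count_erase_of_ne (by simpa using hx)]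
      have h2' : ∀ x, 0 ≤ (skip.insert c (skip.getD c 0 + 1)).getD x 0 := by
        intro x
        rw [PySem.Dict.getD_insert]
        split
        · have := h2 c; omega
        · exact h2 x
      have h3' : pvSkipF (fun x => (skip.insert c (skip.getD c 0 + 1)).getD x 0) orig
          = s2.erase c := by
        have hfe : (fun x => (skip.insert c (skip.getD c 0 + 1)).getD x 0)
            = pvInc (fun x => skip.getD x 0) c := by
          funext x
          rw [PySem.Dict.getD_insert]
          by_cases hx : x = c
          · subst hx; simp [pvInc]
          · simp [pvInc, hx]
        rw [hfe, pvSkipF_inc orig _ h2 c, h3]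
      have := ih (s2.erase c) (avail.insert c (avail.getD c 0 - 1))
        (skip.insert c (skip.getD c 0 + 1)) res h1' h2' h3'
      simpa only [pvGoA, if_pos hmem, pvLoop1, if_pos hc] using this
    · have hcnt : s2.count c = 0 := by have := h1 c; omega
      have hmem : c ∉ s2 := by
        intro h; exact absurd hcnt (Nat.ne_of_gt (List.count_pos_iff.mpr h))
      have := ih s2 avail skip (res ++ [c]) h1 h2 h3
      simpa only [pvGoA, if_neg hmem, pvLoop1, if_neg hc] using this

-- ===== VERDICT (by name: the statement is the Claim_ definition above) =====
theorem check_diff_char_in_2_strings_spec : Claim_equal_check_diff_char_in_2_strings := by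
  intro str1 str2 _
  unfold Spec_check_diff_char_in_2_strings check_diff_char_in_2_strings
    check_diff_char_in_2_strings_alt
  have hcnt : ∀ c, (str2.toList.foldl (fun d c => d.insert c (d.getD c 0 + 1))
      PySem.Dict.empty).getD c 0 = (str2.toList.count c : Int) := by
    intro c
    rw [PySem.Dict.getD_foldl_insert_add_one, PySem.Dict.getD_empty]
    ring
  have hskip : ∀ c, (0 : Int) ≤ (PySem.Dict.empty (κ := Char) (ν := Int)).getD c 0 := by
    intro c; rw [PySem.Dict.getD_empty]
  have hinit : pvSkipF (fun c => (PySem.Dict.empty (κ := Char) (ν := Int)).getD c 0)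
      str2.toList = str2.toList := by
    have : (fun c => (PySem.Dict.empty (κ := Char) (ν := Int)).getD c 0)
        = (fun _ => (0 : Int)) := by funext c; rw [PySem.Dict.getD_empty]
    rw [this, pvSkipF_zero]
  have hm := pvMain str2.toList str1.toList str2.toList
    (str2.toList.foldl (fun d c => d.insert c (d.getD c 0 + 1)) PySem.Dict.empty)
    PySem.Dict.empty [] hcnt hskip hinit
  rw [pvLoop2_eq, ← hm.1, hm.2]
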